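-- pv_equiv track=rewrite | github.com/Haocheng125/Word-learning | 桌面版/pdf_reader.py | _is_valid_english_word
-- ===== SOURCE A (Python) =====
-- def _is_valid_english_word(text: str) -> bool:
--     if not text:
--         return False
--
--     if len(text) < 2 or len(text) > 50:
--         return False
--
--     if text.lower() in ['list', 'word', 'meaning', 'no.', 'n0.', 'vocabulary']:
--         return False
--
--     english_chars = set('abcdefghijklmnopqrstuvwxyzABCDEFGHIJKLMNOPQRSTUVWXYZ-')
--     return all(c in english_chars for c in text) and any(c.isalpha() for c in text)
-- ===== SOURCE B (Python) =====
-- def _is_valid_english_word(text: str) -> bool: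
--     if not (2 <= len(text) <= 50):
--         return False
--     if text.lower() in ('list', 'word', 'meaning', 'no.', 'n0.', 'vocabulary'):
--         return False
--     return text.replace('-', '').isalpha()
-- ===== Notes on version B (the rewrite author's own statement) =====
-- stated objective: idiomatic
-- what changed: The two explicit character scans (all chars in a hand-built allowed set, plus any(c.isalpha())) are replaced by stripping hyphens with str.replace and a single str.isalpha() call, which enforces both conditions at once; the empty check folds into the length guard.
import Mathlib
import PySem

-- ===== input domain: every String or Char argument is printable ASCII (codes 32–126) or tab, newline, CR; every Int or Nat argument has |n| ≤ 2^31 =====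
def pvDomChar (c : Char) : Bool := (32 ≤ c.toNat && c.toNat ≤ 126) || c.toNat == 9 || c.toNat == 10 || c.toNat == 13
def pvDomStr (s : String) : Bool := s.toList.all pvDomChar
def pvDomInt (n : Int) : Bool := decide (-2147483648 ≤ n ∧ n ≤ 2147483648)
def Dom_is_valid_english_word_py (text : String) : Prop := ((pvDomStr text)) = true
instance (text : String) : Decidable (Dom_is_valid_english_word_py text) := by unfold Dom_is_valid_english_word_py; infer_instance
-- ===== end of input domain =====

-- B replaces A's two per-character scans (membership in a hand-built allowed set, plus any isalpha)
-- by stripping hyphens with str.replace and one str.isalpha call (idiomatic; same cost).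


-- ===== PORT A =====
def is_valid_english_word_py (text : String) : Bool :=
  if text.toList.isEmpty then false
  else if PySem.Str.len text < 2 || PySem.Str.len text > 50 then false
  else if (["list", "word", "meaning", "no.", "n0.", "vocabulary"] : List String).contains (PySem.Str.lower text) then false
  else
    let english_chars : PySem.Set Char :=
      PySem.Set.ofList "abcdefghijklmnopqrstuvwxyzABCDEFGHIJKLMNOPQRSTUVWXYZ-".toList
    (text.toList.all (fun c => english_chars.contains c)) &&
      (text.toList.any (fun c => PySem.Chars.isalpha c))

-- ===== PORT B =====
def is_valid_english_word_py_alt (text : String) : Bool :=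
  if !(2 ≤ PySem.Str.len text && PySem.Str.len text ≤ 50) then false
  else if (["list", "word", "meaning", "no.", "n0.", "vocabulary"] : List String).contains (PySem.Str.lower text) then false
  else PySem.Str.strIsalpha (PySem.Str.replace text "-" "")

-- ===== PRECONDITION & SPEC =====
def Spec_is_valid_english_word_py (text : String) (out : Bool) : Prop := out = is_valid_english_word_py_alt text
instance (text : String) (out : Bool) : Decidable (Spec_is_valid_english_word_py text out) := by unfold Spec_is_valid_english_word_py; infer_instance

-- ===== CLAIM (what is proved, stated in full; the proofs are below) =====
def Claim_equal_is_valid_english_word_py : Prop := ∀ (text : String), Dom_is_valid_english_word_py text → Spec_is_valid_english_word_py text (is_valid_english_word_py text)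

-- ===== LEMMAS AND PROOFS =====

-- replacing '-' by '' is filtering out '-'
theorem replace_go_filter (fuel : Nat) : ∀ (l acc : List Char), l.length ≤ fuel →
    PySem.Chars.replace.go ['-'] [] fuel l acc
      = acc.reverse ++ l.filter (fun c => !(c == '-')) := by
  induction fuel with
  | zero =>
    intro l acc h
    have : l = [] := List.length_eq_zero_iff.mp (Nat.le_zero.mp h)
    subst this
    simp [PySem.Chars.replace.go]
  | succ n ih =>
    intro l acc h
    cases l with
    | nil => simp [PySem.Chars.replace.go]
    | cons c t =>
      by_cases hc : c = '-'
      · subst hc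
        have : (['-'] : List Char).isPrefixOf ('-' :: t) = true := by
          simp [List.isPrefixOf]
        rw [PySem.Chars.replace.go]
        simp only [this, if_pos, List.length_cons, List.length_nil, List.drop_succ_cons,
          List.drop_zero, List.reverse_nil, List.nil_append]
        rw [ih t acc (by simpa using Nat.le_of_succ_le_succ h)]
        simp
      · have : (['-'] : List Char).isPrefixOf (c :: t) = false := by
          simp [List.isPrefixOf]
          exact fun hh => hc hh.symm
        rw [PySem.Chars.replace.go]
        simp only [this, Bool.false_eq_true, if_false]
        rw [ih t (c :: acc) (by simpa using Nat.le_of_succ_le_succ h)]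
        simp [hc]

theorem replace_dash (l : List Char) :
    PySem.Chars.replace l "-".toList "".toList = l.filter (fun c => !(c == '-')) := by
  show PySem.Chars.replace l ['-'] [] = _
  rw [PySem.Chars.replace]
  simp only [List.isEmpty_cons, Bool.false_eq_true, if_false]
  simpa using replace_go_filter l.length l [] (Nat.le_refl _)

-- per-character bridge on ASCII: membership in A's allowed set = isalpha or hyphen
set_option maxRecDepth 4000 in
set_option maxHeartbeats 1000000 in
theorem char_key : ∀ n ∈ List.range 127,
    ((PySem.Set.ofList "abcdefghijklmnopqrstuvwxyzABCDEFGHIJKLMNOPQRSTUVWXYZ-".toList).contains (Char.ofNat n)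
      = (PySem.Chars.isalpha (Char.ofNat n) || Char.ofNat n == '-')) := by
  decide

theorem char_key' (c : Char) (h : pvDomChar c = true) :
    (PySem.Set.ofList "abcdefghijklmnopqrstuvwxyzABCDEFGHIJKLMNOPQRSTUVWXYZ-".toList).contains c
      = (PySem.Chars.isalpha c || c == '-') := by
  have hlt : c.toNat ∈ List.range 127 := by
    simp only [List.mem_range]
    simp only [pvDomChar, Bool.or_eq_true, Bool.and_eq_true, decide_eq_true_eq, beq_iff_eq] at h
    omega
  have := char_key c.toNat hlt
  rwa [Char.ofNat_toNat] at this

-- core: A's two scans = B's filter-then-isalpha, on ASCII characters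
theorem core (l : List Char) (h : ∀ c ∈ l, pvDomChar c = true) :
    ((l.all (fun c => (PySem.Set.ofList "abcdefghijklmnopqrstuvwxyzABCDEFGHIJKLMNOPQRSTUVWXYZ-".toList).contains c)) &&
      (l.any (fun c => PySem.Chars.isalpha c)))
    = PySem.Chars.strIsalpha (l.filter (fun c => !(c == '-'))) := by
  rw [Bool.eq_iff_iff]
  simp only [PySem.Chars.strIsalpha, Bool.and_eq_true, List.all_eq_true, List.any_eq_true,
    Bool.not_eq_true', List.isEmpty_eq_false_iff]
  constructor
  · rintro ⟨hall, c, hc, hca⟩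
    have hcd : ¬ (c == '-') = true := by
      simp only [beq_iff_eq]
      intro hh; subst hh; exact absurd hca (by decide)
    constructor
    · intro hnil
      have : c ∈ l.filter (fun c => !(c == '-')) := by
        rw [List.mem_filter]; exact ⟨hc, by simp [hcd]⟩
      rw [hnil] at this; exact absurd this (List.not_mem_nil)
    · intro d hd
      rcases List.mem_filter.mp hd with ⟨hdl, hdne⟩
      have := hall d hdl
      rw [char_key' d (h d hdl)] at this
      simp only [Bool.or_eq_true] at this
      rcases this with ha | hd'
      · exact ha
      · exact absurd hd' (by simpa using hdne)
  · rintro ⟨hne, hall⟩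
    obtain ⟨c, hc⟩ := List.exists_mem_of_ne_nil _ hne
    rcases List.mem_filter.mp hc with ⟨hcl, hcne⟩
    refine ⟨?_, c, hcl, hall c hc⟩
    intro d hd
    rw [char_key' d (h d hd)]
    by_cases hdd : (d == '-') = true
    · simp [hdd]
    · have : d ∈ l.filter (fun c => !(c == '-')) := by
        rw [List.mem_filter]; exact ⟨hd, by simp [hdd]⟩
      simp [hall d this]

-- ===== VERDICT (by name: the statement is the Claim_ definition above) =====
theorem is_valid_english_word_py_spec : Claim_equal_is_valid_english_word_py := by
  intro text hdom
  unfold Spec_is_valid_english_word_py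
  have hdom' : ∀ c ∈ text.toList, pvDomChar c = true := by
    simpa [Dom_is_valid_english_word_py, pvDomStr, List.all_eq_true] using hdom
  have hlen : PySem.Str.len text = (text.toList.length : Int) := by
    simp [PySem.Str.len, PySem.Chars.len]
  unfold is_valid_english_word_py is_valid_english_word_py_alt
  by_cases hempty : text.toList.isEmpty = true
  · have h0 : text.toList.length = 0 := by simpa [List.isEmpty_iff_length_eq_zero] using hempty
    have hff : (2 ≤ PySem.Str.len text && PySem.Str.len text ≤ 50) = false := by
      simp [hlen, h0]
    rw [if_pos hempty, if_pos (show (!(2 ≤ PySem.Str.len text && PySem.Str.len text ≤ 50)) = true by rw [hff]; rfl)]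
  · by_cases hl : (PySem.Str.len text < 2 || PySem.Str.len text > 50) = true
    · have hff : (2 ≤ PySem.Str.len text && PySem.Str.len text ≤ 50) = false := by
        rcases Bool.eq_false_or_eq_true (2 ≤ PySem.Str.len text && PySem.Str.len text ≤ 50) with hc | hc
        · exfalso
          simp only [Bool.and_eq_true, decide_eq_true_eq] at hc
          simp only [Bool.or_eq_true, decide_eq_true_eq] at hl
          omega
        · exact hc
      rw [if_neg hempty, if_pos hl, if_pos (show (!(2 ≤ PySem.Str.len text && PySem.Str.len text ≤ 50)) = true by rw [hff]; rfl)]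
    · have hg : (2 ≤ PySem.Str.len text && PySem.Str.len text ≤ 50) = true := by
        rcases Bool.eq_false_or_eq_true (2 ≤ PySem.Str.len text && PySem.Str.len text ≤ 50) with hc | hc
        · exact hc
        · exfalso
          simp only [Bool.and_eq_false_iff, decide_eq_false_iff_not, not_le] at hc
          simp only [Bool.or_eq_true, decide_eq_true_eq, not_or, not_lt] at hl
          omega
      have hgneg : ¬ ((!(2 ≤ PySem.Str.len text && PySem.Str.len text ≤ 50)) = true) := by
        rw [hg]; decide
      by_cases hb : (["list", "word", "meaning", "no.", "n0.", "vocabulary"] : List String).contains (PySem.Str.lower text) = true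
      · rw [if_neg hempty, if_neg hl, if_pos hb, if_neg hgneg, if_pos hb]
      · rw [if_neg hempty, if_neg hl, if_neg hb, if_neg hgneg, if_neg hb]
        rw [PySem.Str.strIsalpha_eq, PySem.Str.toList_replace, replace_dash]
        exact core text.toList hdom'
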